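-- pv_equiv track=rewrite | github.com/palaneelam/seleniumpython | Assignments/Assignment4/check_element_in_dictionary.py | arrange_list_by_dict_values
-- ===== SOURCE A (Python) =====
-- def arrange_list_by_dict_values(main_list, dictionary_list):
--     """
--     Iterate through a list and remove elements that do not exist as values in the dictionary.
--
--     Parameters:
--     lst (list): The list of elements to check
--     dct (dict): The dictionary whose values to check against
--
--     Returns:
--     list: A filtered list containing only elements that exist as values in the dictionary
--     """
--     # Create a set of dictionary values for faster lookup
--     dict_values = set(dictionary_list.values())
--
--     # Iterate over the list and remove elements that are not in the dictionary values
--     i = 0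
--     while i < len(main_list):
--         if main_list[i] not in dict_values:
--             main_list.pop(i)
--         else:
--             i += 1
--
--     return main_list
-- ===== SOURCE B (Python) =====
-- def arrange_list_by_dict_values(main_list, dictionary_list):
--     """Keep only elements that occur among the dictionary's values.
--
--     Same in-place contract as the original: mutates main_list and returns it,
--     but via a single O(n) two-pointer compaction instead of repeated pop(i).
--     """
--     dict_values = set(dictionary_list.values())
--     w = 0
--     for r in range(len(main_list)):
--         if main_list[r] in dict_values:
--             main_list[w] = main_list[r]
--             w += 1
--     del main_list[w:]
--     return main_list
-- ===== Notes on version B (the rewrite author's own statement) =====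
-- stated objective: faster
-- what changed: Replaces the pop(i)-while-scan (each pop shifts the whole tail) with a single-pass two-pointer in-place compaction plus one tail truncation.
import Mathlib
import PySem

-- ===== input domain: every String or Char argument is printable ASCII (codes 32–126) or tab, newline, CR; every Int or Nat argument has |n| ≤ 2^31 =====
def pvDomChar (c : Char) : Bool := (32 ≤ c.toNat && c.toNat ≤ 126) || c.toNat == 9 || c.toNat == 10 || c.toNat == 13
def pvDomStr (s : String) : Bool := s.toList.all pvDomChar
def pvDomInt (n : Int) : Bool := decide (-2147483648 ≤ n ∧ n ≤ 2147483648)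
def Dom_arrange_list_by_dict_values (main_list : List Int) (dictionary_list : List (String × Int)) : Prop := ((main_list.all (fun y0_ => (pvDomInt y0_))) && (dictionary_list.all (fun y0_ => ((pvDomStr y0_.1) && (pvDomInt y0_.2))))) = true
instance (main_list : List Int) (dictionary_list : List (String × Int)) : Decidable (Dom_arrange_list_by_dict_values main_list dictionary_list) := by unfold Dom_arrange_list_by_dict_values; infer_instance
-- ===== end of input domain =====

-- B replaces A's pop(i) while-scan by a one-pass two-pointer in-place compaction (faster).
-- Both Pythons mutate main_list in place and return it; the equivalence proved here is about the
-- returned value (both end up mutating the list to exactly that value).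

-- ===== PORT A =====
-- the while loop: state is the (mutated) list and the index i; main_list[i] with 0 ≤ i < len is
-- exact as l.getD i 0, and main_list.pop(i) with 0 ≤ i < len is exact as l.eraseIdx i
def pvALoop (vals : List Int) (l : List Int) (i : Nat) : List Int :=
  if h : i < l.length then
    if PySem.Set.contains vals (l.getD i 0) = false then
      pvALoop vals (l.eraseIdx i) i
    else
      pvALoop vals l (i + 1)
  else l
termination_by l.length - i
decreasing_by
  · simp [List.length_eraseIdx, h]; omega
  · omega

def arrange_list_by_dict_values (main_list : List Int) (dictionary_list : List (String × Int)) : List Int :=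
  let dict_values := PySem.Set.ofList (PySem.Dict.values (PySem.Dict.mk dictionary_list))
  pvALoop dict_values main_list 0

-- ===== PORT B =====
-- for r in range(len(main_list)) is exact as a fold over List.range main_list.length;
-- main_list[r] with 0 ≤ r < len is exact as st.1.getD r 0; main_list[w] = x is st.1.set w x;
-- del main_list[w:] is .take w
def arrange_list_by_dict_values_alt (main_list : List Int) (dictionary_list : List (String × Int)) : List Int :=
  let dict_values := PySem.Set.ofList (PySem.Dict.values (PySem.Dict.mk dictionary_list))
  let st := (List.range main_list.length).foldl
    (fun (st : List Int × Nat) r =>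
      if PySem.Set.contains dict_values (st.1.getD r 0) then
        (st.1.set st.2 (st.1.getD r 0), st.2 + 1)
      else st)
    (main_list, 0)
  st.1.take st.2

-- ===== PRECONDITION & SPEC =====
def Spec_arrange_list_by_dict_values (main_list : List Int) (dictionary_list : List (String × Int)) (out : List Int) : Prop := out = arrange_list_by_dict_values_alt main_list dictionary_list
instance (main_list : List Int) (dictionary_list : List (String × Int)) (out : List Int) : Decidable (Spec_arrange_list_by_dict_values main_list dictionary_list out) := by unfold Spec_arrange_list_by_dict_values; infer_instance

-- ===== CLAIM (what is proved, stated in full; the proofs are below) =====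
def Claim_equal_arrange_list_by_dict_values : Prop := ∀ (main_list : List Int) (dictionary_list : List (String × Int)), Dom_arrange_list_by_dict_values main_list dictionary_list → Spec_arrange_list_by_dict_values main_list dictionary_list (arrange_list_by_dict_values main_list dictionary_list)

-- ===== LEMMAS AND PROOFS =====

-- A's loop keeps the already-kept prefix and filters the rest
theorem pvALoop_eq_filter (vals : List Int) (l : List Int) (i : Nat) :
    pvALoop vals l i = l.take i ++ (l.drop i).filter (fun x => PySem.Set.contains vals x) := by
  induction l, i using pvALoop.induct vals with
  | case1 l i h hc ih =>
    rw [pvALoop, dif_pos h, if_pos hc, ih]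
    have hg : l.getD i 0 = l[i] := List.getD_eq_getElem l 0 h
    have hd : l.drop i = l[i] :: l.drop (i+1) := (List.getElem_cons_drop h).symm
    have he : l.eraseIdx i = l.take i ++ l.drop (i+1) := List.eraseIdx_eq_take_drop_succ l i
    have hlen : (l.take i).length = i := by simp; omega
    rw [he, List.take_append_of_le_length (by omega : i ≤ (l.take i).length),
        List.take_take, List.drop_left' hlen, hd, List.filter_cons]
    rw [hg] at hc
    simpa [PySem.Set.contains] using hc
  | case2 l i h hc ih =>
    rw [pvALoop, dif_pos h, if_neg hc, ih]
    have hg : l.getD i 0 = l[i] := List.getD_eq_getElem l 0 h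
    have hd : l.drop i = l[i] :: l.drop (i+1) := (List.getElem_cons_drop h).symm
    simp only [Bool.not_eq_false] at hc
    rw [hg] at hc
    have ht : l.take (i+1) = l.take i ++ [l[i]] := by
      rw [List.take_add_one, List.getElem?_eq_getElem h]; rfl
    rw [hd, List.filter_cons, ht, List.append_assoc]
    simp
    simpa [PySem.Set.contains] using hc
  | case3 l i h =>
    rw [pvALoop, dif_neg h]
    simp [List.drop_eq_nil_of_le (Nat.le_of_not_lt h), List.take_of_length_le (Nat.le_of_not_lt h)]

-- setting the slot just after a prefix replaces the head of the remainder
theorem pvSetAppendCons (F t : List Int) (a x : Int) :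
    (F ++ a :: t).set F.length x = F ++ x :: t := by
  induction F with
  | nil => rfl
  | cons b F ih => simpa using ih

theorem pvBFold_inv (vals : List Int) (l : List Int) (k : Nat) (hk : k ≤ l.length) :
    (List.range k).foldl
      (fun (st : List Int × Nat) r =>
        if PySem.Set.contains vals (st.1.getD r 0) then
          (st.1.set st.2 (st.1.getD r 0), st.2 + 1)
        else st)
      (l, 0)
    = (((l.take k).filter (fun x => PySem.Set.contains vals x)) ++
          l.drop ((l.take k).filter (fun x => PySem.Set.contains vals x)).length,
        ((l.take k).filter (fun x => PySem.Set.contains vals x)).length) := by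
  induction k with
  | zero => simp
  | succ k ih =>
    have hk' : k ≤ l.length := Nat.le_of_succ_le hk
    have hklt : k < l.length := hk
    set F : List Int := (l.take k).filter (fun x => PySem.Set.contains vals x) with hF
    have hFlen : F.length ≤ k := by
      calc F.length ≤ (l.take k).length := List.length_filter_le _ _
        _ = k := by simp; omega
    rw [List.range_succ, List.foldl_append, ih hk']
    simp only [List.foldl_cons, List.foldl_nil]
    have hget : (F ++ l.drop F.length).getD k 0 = l[k] := by
      rw [List.getD_append_right _ _ _ _ hFlen,
          List.getD_eq_getElem?_getD, List.getElem?_drop]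
      have h2 : F.length + (k - F.length) = k := by omega
      rw [h2, List.getElem?_eq_getElem hklt]
      rfl
    have htake : l.take (k+1) = l.take k ++ [l[k]] := by
      rw [List.take_add_one, List.getElem?_eq_getElem hklt]; rfl
    by_cases hc : PySem.Set.contains vals l[k] = true
    · have hm : l[k] ∈ vals := by simpa [PySem.Set.contains] using hc
      rw [hget]
      simp only [hc, if_true]
      have hdrop : l.drop F.length = l[F.length]'(by omega) :: l.drop (F.length + 1) :=
        (List.getElem_cons_drop (by omega)).symm
      have hset : (F ++ l.drop F.length).set F.length l[k]
          = (F ++ [l[k]]) ++ l.drop (F.length + 1) := by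
        rw [hdrop, pvSetAppendCons]; simp
      rw [hset]
      have hF' : (l.take (k+1)).filter (fun x => PySem.Set.contains vals x) = F ++ [l[k]] := by
        rw [htake, List.filter_append, ← hF]; simp [hm]
      rw [hF']
      simp [List.length_append]
    · have hm : l[k] ∉ vals := by simpa [PySem.Set.contains] using hc
      rw [hget, if_neg hc]
      have hF' : (l.take (k+1)).filter (fun x => PySem.Set.contains vals x) = F := by
        rw [htake, List.filter_append, ← hF]
        simp [hm]
      rw [hF']

-- ===== VERDICT (by name: the statement is the Claim_ definition above) =====
theorem arrange_list_by_dict_values_spec : Claim_equal_arrange_list_by_dict_values := by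
  intro l d _
  simp only [Spec_arrange_list_by_dict_values, arrange_list_by_dict_values,
    arrange_list_by_dict_values_alt]
  rw [pvALoop_eq_filter, pvBFold_inv _ _ _ (le_refl _)]
  simp
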